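-- pv_equiv track=rewrite | github.com/chambai/DeepStreamEnsemble | modules_adapt/dnnblockbase.py | calc_inst_gradient
-- ===== SOURCE A (Python) =====
-- def calc_inst_gradient(win_vals):
--     # calculate gradient between each instance
--     grads = []
--     for i, val in enumerate(win_vals):
--         if i > 0:
--             # gradient between 2 points for one instance
--             y = val - win_vals[i - 1]
--             grads.append(y)
--     result = sum(grads)
--     return result
-- ===== SOURCE B (Python) =====
-- def calc_inst_gradient(win_vals):
--     # telescoping sum: the consecutive differences cancel to last - first
--     if len(win_vals) < 2:
--         return 0
--     return win_vals[-1] - win_vals[0]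
-- ===== Notes on version B (the rewrite author's own statement) =====
-- stated objective: faster
-- what changed: Replaces the loop summing consecutive differences with the closed-form telescoping result last - first (0 for fewer than two elements).
import Mathlib
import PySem

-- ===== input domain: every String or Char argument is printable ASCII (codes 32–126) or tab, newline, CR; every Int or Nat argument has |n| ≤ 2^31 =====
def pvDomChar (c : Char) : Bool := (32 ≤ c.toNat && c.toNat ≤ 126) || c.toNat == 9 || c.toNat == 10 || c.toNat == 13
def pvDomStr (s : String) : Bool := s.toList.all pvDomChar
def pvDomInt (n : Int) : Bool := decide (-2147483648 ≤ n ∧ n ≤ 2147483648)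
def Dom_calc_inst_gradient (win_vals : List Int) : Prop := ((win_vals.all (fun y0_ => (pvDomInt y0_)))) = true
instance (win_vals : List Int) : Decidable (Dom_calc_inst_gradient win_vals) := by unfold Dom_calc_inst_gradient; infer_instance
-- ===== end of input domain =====

-- B replaces A's loop over consecutive differences by the closed-form telescoped value
-- last - first (0 if fewer than two elements): asymptotically faster (O(1) vs O(n)).

-- ===== PORT A =====
-- the index i-1 is always in range when i > 0, so pyGetD's default is never used
def calc_inst_gradient (win_vals : List Int) : Int :=
  let grads := (PySem.List.enumerate win_vals 0).foldl
    (fun grads p => if p.1 > 0 then grads ++ [p.2 - PySem.List.pyGetD win_vals (p.1 - 1) 0] else grads) []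
  grads.sum

-- ===== PORT B =====
def calc_inst_gradient_alt (win_vals : List Int) : Int :=
  if win_vals.length < 2 then 0
  else PySem.List.pyGetD win_vals (-1) 0 - PySem.List.pyGetD win_vals 0 0

-- ===== PRECONDITION & SPEC =====
def Spec_calc_inst_gradient (win_vals : List Int) (out : Int) : Prop := out = calc_inst_gradient_alt win_vals
instance (win_vals : List Int) (out : Int) : Decidable (Spec_calc_inst_gradient win_vals out) := by unfold Spec_calc_inst_gradient; infer_instance

-- ===== CLAIM (what is proved, stated in full; the proofs are below) =====
def Claim_equal_calc_inst_gradient : Prop := ∀ (win_vals : List Int), Dom_calc_inst_gradient win_vals → Spec_calc_inst_gradient win_vals (calc_inst_gradient win_vals)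

-- ===== LEMMAS AND PROOFS =====

-- the mapped enumerate segment is the list of consecutive differences
lemma pv_enum_map_eq_zipWith (t : List Int) :
    ∀ (wv : List Int) (s : Int), 1 ≤ s → (s - 1).toNat + t.length ≤ wv.length →
      (PySem.List.enumerate t s).map (fun p => p.2 - PySem.List.pyGetD wv (p.1 - 1) 0)
        = List.zipWith (fun x y => x - y) t (wv.drop (s - 1).toNat) := by
  induction t with
  | nil => intro wv s _ _; simp [PySem.List.enumerate]
  | cons x xs ih =>
    intro wv s hs hlen
    have hlt : (s - 1).toNat < wv.length := by simp at hlen; omega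
    have hdrop : wv.drop (s - 1).toNat = wv[(s - 1).toNat] :: wv.drop ((s - 1).toNat + 1) := by
      exact List.drop_eq_getElem_cons hlt
    rw [PySem.List.enumerate_cons, List.map_cons, hdrop, List.zipWith_cons_cons]
    congr 1
    · show x - PySem.List.pyGetD wv (s - 1) 0 = x - wv[(s - 1).toNat]
      rw [PySem.List.pyGetD_eq_getElem wv 0 (by omega) (by simp at hlen; omega)]
    · have hnat : (s + 1 - 1).toNat = (s - 1).toNat + 1 := by omega
      have := ih wv (s + 1) (by omega) (by rw [hnat]; simp only [List.length_cons] at hlen; omega)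
      rw [this, hnat]

-- every index produced by enumerate from s ≥ 1 is positive, so the branch always appends
lemma pv_foldl_pos (f : Int × Int → Int) : ∀ (t : List Int) (s : Int) (acc : List Int), 1 ≤ s →
    List.foldl (fun g (p : Int × Int) => if 0 < p.1 then g ++ [f p] else g) acc (PySem.List.enumerate t s)
      = acc ++ (PySem.List.enumerate t s).map f := by
  intro t
  induction t with
  | nil => intro s acc _; simp [PySem.List.enumerate]
  | cons x xs ih =>
    intro s acc hs
    rw [PySem.List.enumerate_cons, List.foldl_cons, List.map_cons, if_pos (by omega : (0:Int) < (s, x).1)]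
    rw [ih (s + 1) _ (by omega)]
    simp

-- telescoping: the consecutive differences of a :: t sum to last - first
lemma pv_telescope (t : List Int) : ∀ (a : Int),
    (List.zipWith (fun x y => x - y) t (a :: t)).sum = t.getLastD a - a := by
  induction t with
  | nil => intro a; simp
  | cons x xs ih =>
    intro a
    rw [List.zipWith_cons_cons, List.sum_cons, ih x, List.getLastD_cons]
    omega

-- ===== VERDICT (by name: the statement is the Claim_ definition above) =====
theorem calc_inst_gradient_spec : Claim_equal_calc_inst_gradient := by
  intro wv _
  unfold Spec_calc_inst_gradient calc_inst_gradient calc_inst_gradient_alt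
  cases wv with
  | nil => simp [PySem.List.enumerate]
  | cons a t =>
    rw [PySem.List.enumerate_cons]
    simp only [List.foldl_cons, gt_iff_lt, lt_self_iff_false, if_false, zero_add]
    rw [pv_foldl_pos _ t 1 [] le_rfl, List.nil_append]
    rw [pv_enum_map_eq_zipWith t (a :: t) 1 le_rfl (by simp)]
    simp only [show ((1:Int) - 1).toNat = 0 from rfl, List.drop_zero]
    rw [pv_telescope t a]
    cases t with
    | nil => simp
    | cons b u =>
      rw [if_neg (by simp)]
      rw [PySem.List.pyGetD_neg_one _ _ (by simp), PySem.List.pyGetD_zero_cons]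
      simp [List.getLast_eq_getLastD, List.getLast?_cons]
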